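-- pv_equiv track=rewrite | github.com/davidiach/erdos97 | scripts/independent_check_n8_incidence_json.py | passes_forced_perpendicularity_filter
-- ===== SOURCE A (Python) =====
-- from collections import deque
--
-- N = 8
--
-- CHORDS = tuple((a, b) for a in range(N) for b in range(a + 1, N))
--
-- def chord(a: int, b: int) -> tuple[int, int]:
--     return (a, b) if a < b else (b, a)
--
-- def bits(mask: int) -> list[int]:
--     return [idx for idx in range(N) if (mask >> idx) & 1]
--
-- def forced_perpendicularity_graph(rows: tuple[int, ...]) -> dict[tuple[int, int], set[tuple[int, int]]]:
--     graph = {edge: set() for edge in CHORDS}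
--     for i in range(N):
--         for j in range(i + 1, N):
--             common = rows[i] & rows[j]
--             if common.bit_count() != 2:
--                 continue
--             a, b = bits(common)
--             source = (i, j)
--             target = chord(a, b)
--             graph[source].add(target)
--             graph[target].add(source)
--     return graph
--
-- def passes_forced_perpendicularity_filter(rows: tuple[int, ...]) -> bool:
--     graph = forced_perpendicularity_graph(rows)
--     color: dict[tuple[int, int], int] = {}
--     for start in CHORDS:
--         if start in color:
--             continue
--         color[start] = 0
--         q: deque[tuple[int, int]] = deque([start])
--         component: list[tuple[int, int]] = [start]
--         while q:
--             current = q.popleft()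
--             for neighbor in graph[current]:
--                 if neighbor not in color:
--                     color[neighbor] = 1 - color[current]
--                     component.append(neighbor)
--                     q.append(neighbor)
--                 elif color[neighbor] == color[current]:
--                     return False
--
--         used_endpoints_by_color = [0, 0]
--         for edge in component:
--             edge_color = color[edge]
--             a, b = edge
--             endpoint_bits = (1 << a) | (1 << b)
--             if used_endpoints_by_color[edge_color] & endpoint_bits:
--                 return False
--             used_endpoints_by_color[edge_color] |= endpoint_bits
--     return True
-- ===== SOURCE B (Python) =====
-- N = 8
--
-- CHORDS = tuple((a, b) for a in range(N) for b in range(a + 1, N))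
--
--
-- def passes_forced_perpendicularity_filter(rows):
--     # Symmetric edge list of the forced-perpendicularity graph (same double
--     # loop as the original graph builder, but as a flat list of arcs).
--     edges = []
--     for i in range(N):
--         for j in range(i + 1, N):
--             common = rows[i] & rows[j]
--             if common.bit_count() != 2:
--                 continue
--             a, b = [idx for idx in range(N) if (common >> idx) & 1]
--             target = (a, b)
--             edges.append(((i, j), target))
--             edges.append((target, (i, j)))
--     # Parity reachability closure: (u, v, p) is recorded iff there is a walk
--     # from u to v whose length has parity p.  Iterate composition with single
--     # arcs until a fixpoint is reached.
--     reach = {(v, v, 0) for v in CHORDS}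
--     while True:
--         new = set(reach)
--         for (u, v, p) in reach:
--             for (x, y) in edges:
--                 if v == x:
--                     new.add((u, y, 1 - p))
--         if len(new) == len(reach):
--             break
--         reach = new
--     # Bipartite iff no chord reaches itself by an odd walk.
--     for v in CHORDS:
--         if (v, v, 1) in reach:
--             return False
--     # Two distinct chords joined by an even walk are forced parallel, so they
--     # must not share an endpoint.
--     for u in CHORDS:
--         for v in CHORDS:
--             if u != v and (u, v, 0) in reach:
--                 mu = (1 << u[0]) | (1 << u[1])
--                 mv = (1 << v[0]) | (1 << v[1])
--                 if mu & mv: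
--                     return False
--     return True
-- ===== Notes on version B (the rewrite author's own statement) =====
-- stated objective: alternative
-- what changed: Replaces A's per-component BFS two-colouring (queue + colour dict + per-component endpoint masks) with a global walk-parity reachability closure: iterate composing (u,v,parity) triples with the edge list to a fixpoint, then read bipartiteness (no odd self-reach) and endpoint conflicts (no overlapping masks on even-reachable distinct chords) directly off the relation.
import Mathlib
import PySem

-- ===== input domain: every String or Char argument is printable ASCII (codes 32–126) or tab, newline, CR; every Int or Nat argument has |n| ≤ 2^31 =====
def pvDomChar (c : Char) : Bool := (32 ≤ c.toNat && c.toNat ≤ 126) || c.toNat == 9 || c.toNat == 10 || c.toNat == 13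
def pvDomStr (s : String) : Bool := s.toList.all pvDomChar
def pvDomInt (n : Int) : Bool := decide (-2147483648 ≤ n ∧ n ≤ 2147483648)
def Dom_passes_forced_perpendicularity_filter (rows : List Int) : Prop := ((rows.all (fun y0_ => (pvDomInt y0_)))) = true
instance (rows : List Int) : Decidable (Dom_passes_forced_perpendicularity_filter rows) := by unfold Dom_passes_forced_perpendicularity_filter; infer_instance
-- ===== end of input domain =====

-- B replaces A's BFS two-coloring with a parity-reachability closure (alternative algorithm,
-- same return value); neither implementation mutates its argument.
-- Python A iterates over hash-ordered sets; both ports iterate in insertion order — the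
-- returned Bool is proved independent of those orders (both equal a walk-parity predicate).

-- ===== PORT A =====

-- N = 8
def pvN : Int := 8

-- CHORDS = tuple((a, b) for a in range(N) for b in range(a + 1, N))
def pvCHORDS : List (Int × Int) :=
  (PySem.List.pyRange 0 pvN 1).flatMap (fun a =>
    (PySem.List.pyRange (a + 1) pvN 1).map (fun b => (a, b)))

-- chord(a, b)
def pvChord (a b : Int) : Int × Int := if a < b then (a, b) else (b, a)

-- bits(mask): [idx for idx in range(N) if (mask >> idx) & 1]  (idx ∈ 0..7, so the
-- Nat shift `>>> idx.toNat` is exactly Python's `mask >> idx`)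
def pvBits (mask : Int) : List Int :=
  (PySem.List.pyRange 0 pvN 1).filter (fun idx => PySem.Int.band (mask >>> idx.toNat) 1 == 1)

-- (1 << a) | (1 << b): endpoint bitmask of a chord (a, b ∈ 0..7 wherever evaluated)
def pvMask (e : Int × Int) : Int := PySem.Int.bor (1 <<< e.1.toNat) (1 <<< e.2.toNat)

-- forced_perpendicularity_graph(rows); rows[i] is pyGetD (IndexError excluded by Pre_);
-- the `| _ =>` arm is Python's ValueError on `a, b = bits(common)` (excluded by Pre_).
def pvBuildGraph (rows : List Int) : PySem.Dict (Int × Int) (PySem.Set (Int × Int)) :=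
  let g0 := pvCHORDS.foldl (fun g e => g.insert e PySem.Set.empty) PySem.Dict.empty
  (PySem.List.pyRange 0 pvN 1).foldl (fun g i =>
    (PySem.List.pyRange (i + 1) pvN 1).foldl (fun g j =>
      let common := PySem.Int.band (PySem.List.pyGetD rows i 0) (PySem.List.pyGetD rows j 0)
      if PySem.Int.bitCount common ≠ 2 then g
      else
        match pvBits common with
        | [a, b] =>
            let source := (i, j)
            let target := pvChord a b
            let g' := g.modify source PySem.Set.empty (fun s => PySem.Set.add s target)
            g'.modify target PySem.Set.empty (fun s => PySem.Set.add s source)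
        | _ => g
      ) g) g0

-- the `for neighbor in graph[current]` body (colour lookups are getD: the keys are
-- always present where Python reaches them); `none` = `return False`
def pvVisit (current : Int × Int) :
    List (Int × Int) → PySem.Dict (Int × Int) Int → List (Int × Int) → List (Int × Int) →
    Option (PySem.Dict (Int × Int) Int × List (Int × Int) × List (Int × Int))
  | [], color, q, comp => some (color, q, comp)
  | n :: rest, color, q, comp =>
    if color.contains n = false then
      pvVisit current rest (color.insert n (1 - color.getD current 0)) (q ++ [n]) (comp ++ [n])
    else if color.getD n 0 == color.getD current 0 then none
    else pvVisit current rest color q comp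

-- the `while q:` loop; fuel 64 is never exhausted: at most the 28 chords ever enter
-- the queue (lemma pvBFS_spec below discharges the fuel)
def pvBFS (g : PySem.Dict (Int × Int) (PySem.Set (Int × Int))) :
    Nat → PySem.Dict (Int × Int) Int → List (Int × Int) → List (Int × Int) →
    Option (PySem.Dict (Int × Int) Int × List (Int × Int))
  | 0, color, _, comp => some (color, comp)
  | fuel + 1, color, q, comp =>
    match q with
    | [] => some (color, comp)
    | current :: qrest =>
      match pvVisit current (g.getD current PySem.Set.empty) color qrest comp with
      | none => none
      | some (color', q', comp') => pvBFS g fuel color' q' comp'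

-- the `for edge in component:` endpoint check; used = used_endpoints_by_color (a 2-list)
def pvEpLoop (color : PySem.Dict (Int × Int) Int) :
    List (Int × Int) → List Int → Bool
  | [], _ => true
  | e :: rest, used =>
    let c := color.getD e 0
    let ebits := pvMask e
    if PySem.Int.band (PySem.List.pyGetD used c 0) ebits ≠ 0 then false
    else pvEpLoop color rest (PySem.List.pySetD used c (PySem.Int.bor (PySem.List.pyGetD used c 0) ebits))

-- the `for start in CHORDS:` loop
def pvMain (g : PySem.Dict (Int × Int) (PySem.Set (Int × Int))) :
    List (Int × Int) → PySem.Dict (Int × Int) Int → Bool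
  | [], _ => true
  | start :: rest, color =>
    if color.contains start then pvMain g rest color
    else
      let color1 := color.insert start 0
      match pvBFS g 64 color1 [start] [start] with
      | none => false
      | some (color2, comp) =>
        if pvEpLoop color2 comp [0, 0] then pvMain g rest color2 else false

def passes_forced_perpendicularity_filter (rows : List Int) : Bool :=
  pvMain (pvBuildGraph rows) pvCHORDS PySem.Dict.empty

-- ===== PORT B =====

-- the comprehension [idx for idx in range(N) if (common >> idx) & 1] (idx ∈ 0..7,
-- so the Nat shift `>>> idx.toNat` is exactly Python's `>>`)
def pvBitsB (mask : Int) : List Int :=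
  (PySem.List.pyRange 0 8 1).filter (fun idx => PySem.Int.band (mask >>> idx.toNat) 1 == 1)

-- the edge list (same double loop as A's graph builder, as a flat list of arcs);
-- the `| _ =>` arm is Python's ValueError on the 2-element unpack (excluded by Pre_)
def pvEdges (rows : List Int) : List ((Int × Int) × (Int × Int)) :=
  (PySem.List.pyRange 0 8 1).foldl (fun es i =>
    (PySem.List.pyRange (i + 1) 8 1).foldl (fun es j =>
      let common := PySem.Int.band (PySem.List.pyGetD rows i 0) (PySem.List.pyGetD rows j 0)
      if PySem.Int.bitCount common ≠ 2 then es
      else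
        match pvBitsB common with
        | [a, b] => es ++ [((i, j), (a, b)), ((a, b), (i, j))]
        | _ => es
      ) es) []

-- one round of the closure: new = set(reach); add (u, y, 1-p) for (u,v,p) ∈ reach, (v,y) ∈ edges
def pvStep (edges : List ((Int × Int) × (Int × Int)))
    (reach : PySem.Set ((Int × Int) × (Int × Int) × Int)) :
    PySem.Set ((Int × Int) × (Int × Int) × Int) :=
  reach.foldl (fun new t =>
    edges.foldl (fun new e =>
      if t.2.1 == e.1 then PySem.Set.add new (t.1, e.2, 1 - t.2.2) else new) new) reach

-- the `while True:` loop; fuel 1600 is never exhausted: each non-final round adds at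
-- least one of the ≤ 28·28·2 = 1568 possible triples (lemma pvClosure_spec below)
def pvClosure (edges : List ((Int × Int) × (Int × Int))) :
    Nat → PySem.Set ((Int × Int) × (Int × Int) × Int) → PySem.Set ((Int × Int) × (Int × Int) × Int)
  | 0, reach => reach
  | fuel + 1, reach =>
    let new := pvStep edges reach
    if PySem.Set.len new == PySem.Set.len reach then reach
    else pvClosure edges fuel new

def passes_forced_perpendicularity_filter_alt (rows : List Int) : Bool :=
  let edges := pvEdges rows
  let reach := pvClosure edges 1600 (PySem.Set.ofList (pvCHORDS.map (fun v => (v, v, (0 : Int)))))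
  if pvCHORDS.any (fun v => PySem.Set.contains reach (v, v, 1)) then false
  else if pvCHORDS.any (fun u => pvCHORDS.any (fun v =>
      decide (u ≠ v) && PySem.Set.contains reach (u, v, 0) &&
      decide (PySem.Int.band (pvMask u) (pvMask v) ≠ 0))) then false
  else true

-- ===== PRECONDITION & SPEC =====
-- Pre_ excludes exactly the inputs where the Python raises: fewer than 8 rows
-- (IndexError on rows[i]), or a pair whose common mask has bit_count 2 but not exactly
-- two of its low 8 bits set (ValueError on the 2-element unpack `a, b = bits(common)`).
-- (Both ports resolve those raising spots the same way, so the equivalence proof happens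
-- to hold on all inputs; Pre_ is still stated because the claim is only about inputs on
-- which the Python programs return.)
def Pre_passes_forced_perpendicularity_filter (rows : List Int) : Prop :=
  8 ≤ rows.length ∧
  ∀ i < 8, ∀ j < 8, i < j →
    PySem.Int.bitCount (PySem.Int.band (rows.getD i 0) (rows.getD j 0)) = 2 →
    ((List.range 8).filter (fun idx =>
      PySem.Int.band (PySem.Int.band (rows.getD i 0) (rows.getD j 0) >>> idx) 1 == 1)).length = 2
instance (rows : List Int) : Decidable (Pre_passes_forced_perpendicularity_filter rows) := by
  unfold Pre_passes_forced_perpendicularity_filter; infer_instance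

def pvWitness_passes_forced_perpendicularity_filter : List Int := [1, 2, 4, 8, 16, 32, 64, 128]

def Spec_passes_forced_perpendicularity_filter (rows : List Int) (out : Bool) : Prop := out = passes_forced_perpendicularity_filter_alt rows
instance (rows : List Int) (out : Bool) : Decidable (Spec_passes_forced_perpendicularity_filter rows out) := by unfold Spec_passes_forced_perpendicularity_filter; infer_instance

-- ===== CLAIM (what is proved, stated in full; the proofs are below) =====
def Claim_equal_passes_forced_perpendicularity_filter : Prop := ∀ (rows : List Int), Dom_passes_forced_perpendicularity_filter rows → Pre_passes_forced_perpendicularity_filter rows → Spec_passes_forced_perpendicularity_filter rows (passes_forced_perpendicularity_filter rows)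

-- ===== LEMMAS AND PROOFS =====

-- ===================== Layer 1: edge-list / graph characterization =====================

-- the per-pair event list: the two arcs contributed by the pair (i, j)
def pvEv (rows : List Int) (i j : Int) : List ((Int × Int) × (Int × Int)) :=
  let common := PySem.Int.band (PySem.List.pyGetD rows i 0) (PySem.List.pyGetD rows j 0)
  if PySem.Int.bitCount common ≠ 2 then []
  else
    match pvBitsB common with
    | [a, b] => [((i, j), (a, b)), ((a, b), (i, j))]
    | _ => []

def pvAdj (rows : List Int) (u v : Int × Int) : Prop := (u, v) ∈ pvEdges rows

lemma mem_pvCHORDS {p : Int × Int} : p ∈ pvCHORDS ↔ 0 ≤ p.1 ∧ p.1 < p.2 ∧ p.2 < 8 := by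
  obtain ⟨a, b⟩ := p
  simp only [pvCHORDS, pvN, List.mem_flatMap, List.mem_map, PySem.List.mem_pyRange_one]
  constructor
  · rintro ⟨x, ⟨hx1, hx2⟩, y, ⟨hy1, hy2⟩, h⟩
    obtain ⟨rfl, rfl⟩ := Prod.mk.inj h.symm
    exact ⟨hx1, by omega, hy2⟩
  · rintro ⟨h1, h2, h3⟩
    exact ⟨a, ⟨h1, by omega⟩, b, ⟨by omega, h3⟩, rfl⟩

lemma nodup_pvCHORDS : pvCHORDS.Nodup := by decide

lemma length_pvCHORDS : pvCHORDS.length = 28 := by decide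

lemma pvEdges_eq (rows : List Int) :
    pvEdges rows =
      (PySem.List.pyRange 0 8 1).flatMap (fun i =>
        (PySem.List.pyRange (i + 1) 8 1).flatMap (fun j => pvEv rows i j)) := by
  unfold pvEdges
  have hinner : ∀ (i : Int) (es : List ((Int × Int) × (Int × Int))),
      (PySem.List.pyRange (i + 1) 8 1).foldl (fun es j =>
        let common := PySem.Int.band (PySem.List.pyGetD rows i 0) (PySem.List.pyGetD rows j 0)
        if PySem.Int.bitCount common ≠ 2 then es
        else
          match pvBitsB common with
          | [a, b] => es ++ [((i, j), (a, b)), ((a, b), (i, j))]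
          | _ => es) es
      = es ++ (PySem.List.pyRange (i + 1) 8 1).flatMap (fun j => pvEv rows i j) := by
    intro i es
    refine (PySem.List.foldl_congr_mem _ _ (fun es j => es ++ pvEv rows i j) _ ?_).trans
      (PySem.List.foldl_append_eq_flatMap _ _ _)
    intro acc x _
    simp only [pvEv]
    by_cases hc : PySem.Int.bitCount (PySem.Int.band (PySem.List.pyGetD rows i 0) (PySem.List.pyGetD rows x 0)) ≠ 2
    · simp [hc]
    · rw [if_neg hc, if_neg hc]
      generalize pvBitsB (PySem.Int.band (PySem.List.pyGetD rows i 0) (PySem.List.pyGetD rows x 0)) = F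
      rcases F with _ | ⟨a, _ | ⟨b, _ | ⟨c, t⟩⟩⟩ <;> simp
  refine ((PySem.List.foldl_congr_mem _ _
      (fun es i => es ++ (PySem.List.pyRange (i + 1) 8 1).flatMap (fun j => pvEv rows i j)) _
      (fun acc x _ => hinner x acc)).trans
    (PySem.List.foldl_append_eq_flatMap _ _ _)).trans (by simp)

lemma mem_pvEdges {rows : List Int} {e : (Int × Int) × (Int × Int)} :
    e ∈ pvEdges rows ↔ ∃ i j : Int, (0 ≤ i ∧ i < j ∧ j < 8) ∧ e ∈ pvEv rows i j := by
  rw [pvEdges_eq]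
  simp only [List.mem_flatMap, PySem.List.mem_pyRange_one]
  constructor
  · rintro ⟨i, ⟨hi1, hi2⟩, j, ⟨hj1, hj2⟩, h⟩
    exact ⟨i, j, ⟨hi1, by omega, hj2⟩, h⟩
  · rintro ⟨i, j, ⟨h1, h2, h3⟩, h⟩
    exact ⟨i, ⟨h1, by omega⟩, j, ⟨by omega, h3⟩, h⟩

lemma pvBitsB_eq_pvBits (m : Int) : pvBitsB m = pvBits m := rfl

lemma pvBits_shape {m a b : Int} (h : pvBits m = [a, b]) : 0 ≤ a ∧ a < b ∧ b < 8 := by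
  have hsort : (pvBits m).Pairwise (· < ·) :=
    List.Pairwise.filter _ (PySem.List.pairwise_lt_pyRange_one 0 pvN)
  have hmem : ∀ x ∈ pvBits m, 0 ≤ x ∧ x < 8 := by
    intro x hx
    have := List.mem_of_mem_filter hx
    rw [PySem.List.mem_pyRange_one] at this
    simpa [pvN] using this
  rw [h] at hsort hmem
  have h1 := hmem a (by simp)
  have h2 := hmem b (by simp)
  have h3 : a < b := by
    have := List.pairwise_cons.mp hsort
    exact this.1 b (by simp)
  exact ⟨h1.1, h3, h2.2⟩

lemma mem_pvEv_iff {rows : List Int} {i j : Int} {e : (Int × Int) × (Int × Int)} :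
    e ∈ pvEv rows i j ↔
      ∃ a b : Int,
        pvBitsB (PySem.Int.band (PySem.List.pyGetD rows i 0) (PySem.List.pyGetD rows j 0)) = [a, b] ∧
        PySem.Int.bitCount (PySem.Int.band (PySem.List.pyGetD rows i 0) (PySem.List.pyGetD rows j 0)) = 2 ∧
        (e = ((i, j), (a, b)) ∨ e = ((a, b), (i, j))) := by
  simp only [pvEv]
  split
  · rename_i h
    simp only [List.not_mem_nil, false_iff]
    rintro ⟨a, b, -, h2, -⟩
    exact h h2
  · rename_i h
    split
    · rename_i a b heq
      constructor
      · intro hm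
        refine ⟨a, b, heq, by omega, ?_⟩
        simpa using hm
      · rintro ⟨a', b', heq', -, hor⟩
        rw [heq] at heq'
        obtain ⟨rfl, rfl⟩ : a = a' ∧ b = b' := by
          have h1 := congrArg (fun l => l[0]!) heq'
          have h2 := congrArg (fun l => l[1]!) heq'
          simp at h1 h2
          exact ⟨h1, h2⟩
        simpa using hor
    · rename_i hne
      simp only [List.not_mem_nil, false_iff]
      rintro ⟨a, b, heq, -, -⟩
      exact hne a b heq

lemma pvAdj_symm {rows : List Int} {u v : Int × Int} (h : pvAdj rows u v) : pvAdj rows v u := by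
  unfold pvAdj at *
  rw [mem_pvEdges] at *
  obtain ⟨i, j, hb, he⟩ := h
  refine ⟨i, j, hb, ?_⟩
  rw [mem_pvEv_iff] at *
  obtain ⟨a, b, h1, h2, h3⟩ := he
  refine ⟨a, b, h1, h2, ?_⟩
  rcases h3 with h | h <;> obtain ⟨rfl, rfl⟩ := Prod.mk.inj h
  · exact Or.inr rfl
  · exact Or.inl rfl

lemma pvAdj_chords {rows : List Int} {u v : Int × Int} (h : pvAdj rows u v) :
    u ∈ pvCHORDS ∧ v ∈ pvCHORDS := by
  unfold pvAdj at h
  rw [mem_pvEdges] at h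
  obtain ⟨i, j, ⟨h1, h2, h3⟩, he⟩ := h
  rw [mem_pvEv_iff] at he
  obtain ⟨a, b, hbits, -, hor⟩ := he
  have hab := pvBits_shape (pvBitsB_eq_pvBits _ ▸ hbits)
  have hij : ((i, j) : Int × Int) ∈ pvCHORDS := mem_pvCHORDS.mpr ⟨h1, h2, h3⟩
  have hab' : ((a, b) : Int × Int) ∈ pvCHORDS := mem_pvCHORDS.mpr hab
  rcases hor with h | h <;> obtain ⟨rfl, rfl⟩ := Prod.mk.inj h
  · exact ⟨hij, hab'⟩
  · exact ⟨hab', hij⟩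

-- ===================== Layer 2: A's graph builds exactly the pvEdges adjacency =====================

lemma pvG0_getD (l : List (Int × Int)) (d : PySem.Dict (Int × Int) (PySem.Set (Int × Int)))
    (h : ∀ u, d.getD u PySem.Set.empty = PySem.Set.empty) :
    ∀ u, (l.foldl (fun g e => g.insert e PySem.Set.empty) d).getD u PySem.Set.empty = PySem.Set.empty := by
  induction l generalizing d with
  | nil => exact h
  | cons x xs ih =>
    refine ih _ (fun u => ?_)
    rw [PySem.Dict.getD_insert]
    split
    · rfl
    · exact h u

-- one (i, j) step of the graph builder
def pvStepD (rows : List Int) (d : PySem.Dict (Int × Int) (PySem.Set (Int × Int))) (i j : Int) :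
    PySem.Dict (Int × Int) (PySem.Set (Int × Int)) :=
  let common := PySem.Int.band (PySem.List.pyGetD rows i 0) (PySem.List.pyGetD rows j 0)
  if PySem.Int.bitCount common ≠ 2 then d
  else
    match pvBits common with
    | [a, b] =>
        let source := (i, j)
        let target := pvChord a b
        let g' := d.modify source PySem.Set.empty (fun s => PySem.Set.add s target)
        g'.modify target PySem.Set.empty (fun s => PySem.Set.add s source)
    | _ => d

lemma pvBuildGraph_eq (rows : List Int) :
    pvBuildGraph rows =
      pvCHORDS.foldl (fun d p => pvStepD rows d p.1 p.2)
        (pvCHORDS.foldl (fun g e => g.insert e PySem.Set.empty) PySem.Dict.empty) := by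
  simp only [pvBuildGraph]
  generalize pvCHORDS.foldl (fun g e => g.insert e PySem.Set.empty) PySem.Dict.empty = d0
  conv_rhs => rw [pvCHORDS, List.foldl_flatMap]
  simp only [List.foldl_map, pvStepD, pvN]

lemma pvStepD_mem (rows : List Int) (d : PySem.Dict (Int × Int) (PySem.Set (Int × Int)))
    (i j : Int) (u v : Int × Int) :
    v ∈ (pvStepD rows d i j).getD u PySem.Set.empty ↔
      v ∈ d.getD u PySem.Set.empty ∨ (u, v) ∈ pvEv rows i j := by
  simp only [pvStepD, pvEv, ← pvBitsB_eq_pvBits]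
  by_cases hc : PySem.Int.bitCount (PySem.Int.band (PySem.List.pyGetD rows i 0) (PySem.List.pyGetD rows j 0)) ≠ 2
  · simp [hc]
  · rw [if_neg hc, if_neg hc]
    rcases hF : pvBitsB (PySem.Int.band (PySem.List.pyGetD rows i 0) (PySem.List.pyGetD rows j 0))
      with _ | ⟨a, _ | ⟨b, _ | ⟨c, _⟩⟩⟩
    · simp
    · simp
    · have hsh := pvBits_shape (pvBitsB_eq_pvBits _ ▸ hF)
      have hchord : pvChord a b = (a, b) := if_pos hsh.2.1
      simp only [hchord, PySem.Dict.getD_modify, List.mem_cons,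
        List.not_mem_nil, or_false, Prod.mk.injEq]
      split_ifs <;> simp_all <;> tauto
    · simp

lemma pvStepD_nodup (rows : List Int) (d : PySem.Dict (Int × Int) (PySem.Set (Int × Int)))
    (i j : Int) (h : ∀ u, (d.getD u PySem.Set.empty).Nodup) :
    ∀ u, ((pvStepD rows d i j).getD u PySem.Set.empty).Nodup := by
  intro u
  simp only [pvStepD]
  by_cases hc : PySem.Int.bitCount (PySem.Int.band (PySem.List.pyGetD rows i 0) (PySem.List.pyGetD rows j 0)) ≠ 2
  · simp [hc]; exact h u
  · rw [if_neg hc]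
    rcases hF : pvBits (PySem.Int.band (PySem.List.pyGetD rows i 0) (PySem.List.pyGetD rows j 0))
      with _ | ⟨a, _ | ⟨b, _ | ⟨c, _⟩⟩⟩
    · exact h u
    · exact h u
    · simp only [PySem.Dict.getD_modify]
      split_ifs <;> (try exact PySem.Set.nodup_add _ _ (PySem.Set.nodup_add _ _ (h _))) <;>
        (try exact PySem.Set.nodup_add _ _ (h _)) <;> exact h u
    · exact h u

lemma pvFoldl_stepD_mem (rows : List Int) :
    ∀ (ps : List (Int × Int)) (d : PySem.Dict (Int × Int) (PySem.Set (Int × Int))) (u v : Int × Int),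
    v ∈ (ps.foldl (fun d p => pvStepD rows d p.1 p.2) d).getD u PySem.Set.empty ↔
      v ∈ d.getD u PySem.Set.empty ∨ ∃ p ∈ ps, (u, v) ∈ pvEv rows p.1 p.2 := by
  intro ps
  induction ps with
  | nil => simp
  | cons q qs ih =>
    intro d u v
    simp only [List.foldl_cons, ih, pvStepD_mem, List.mem_cons]
    constructor
    · rintro ((h | h) | ⟨p, hp, h⟩)
      · exact Or.inl h
      · exact Or.inr ⟨q, Or.inl rfl, h⟩
      · exact Or.inr ⟨p, Or.inr hp, h⟩
    · rintro (h | ⟨p, (rfl | hp), h⟩)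
      · exact Or.inl (Or.inl h)
      · exact Or.inl (Or.inr h)
      · exact Or.inr ⟨p, hp, h⟩

lemma pvFoldl_stepD_nodup (rows : List Int) :
    ∀ (ps : List (Int × Int)) (d : PySem.Dict (Int × Int) (PySem.Set (Int × Int))),
    (∀ u, (d.getD u PySem.Set.empty).Nodup) →
    ∀ u, ((ps.foldl (fun d p => pvStepD rows d p.1 p.2) d).getD u PySem.Set.empty).Nodup := by
  intro ps
  induction ps with
  | nil => exact fun d h => h
  | cons q qs ih => exact fun d h => ih _ (pvStepD_nodup rows d q.1 q.2 h)

lemma pvGraph_mem {rows : List Int} {u v : Int × Int} :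
    v ∈ (pvBuildGraph rows).getD u PySem.Set.empty ↔ pvAdj rows u v := by
  rw [pvBuildGraph_eq, pvFoldl_stepD_mem]
  rw [pvG0_getD _ _ (fun u => by rw [PySem.Dict.getD_empty]) u]
  simp only [PySem.Set.empty, List.not_mem_nil, false_or]
  unfold pvAdj
  rw [mem_pvEdges]
  constructor
  · rintro ⟨p, hp, h⟩
    exact ⟨p.1, p.2, by simpa using (mem_pvCHORDS.mp hp), h⟩
  · rintro ⟨i, j, hb, h⟩
    exact ⟨(i, j), mem_pvCHORDS.mpr (by simpa using hb), h⟩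

lemma pvGraph_nodup (rows : List Int) (u : Int × Int) :
    ((pvBuildGraph rows).getD u PySem.Set.empty).Nodup := by
  rw [pvBuildGraph_eq]
  exact pvFoldl_stepD_nodup rows _ _
    (fun u => by rw [pvG0_getD _ _ (fun u => by rw [PySem.Dict.getD_empty]) u]; exact List.nodup_nil) u

-- ===================== Layer 3: walks and the common specification =====================

inductive pvWalk (rows : List Int) : (Int × Int) → (Int × Int) → Bool → Prop
  | nil (v : Int × Int) : pvWalk rows v v false
  | cons {u v w : Int × Int} {p : Bool} :
      pvAdj rows u v → pvWalk rows v w p → pvWalk rows u w (!p)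

-- the order-independent meaning of both programs: the graph is bipartite (no odd closed
-- walk) and chords joined by an even walk never share an endpoint
def pvOk (rows : List Int) : Prop :=
  (∀ v, ¬ pvWalk rows v v true) ∧
  (∀ u v, u ≠ v → pvWalk rows u v false →
    PySem.Int.band (pvMask u) (pvMask v) = 0)

lemma pvWalk.single {rows : List Int} {u v : Int × Int} (h : pvAdj rows u v) :
    pvWalk rows u v true := by
  have := pvWalk.cons h (pvWalk.nil v)
  simpa using this

lemma pvWalk.snoc {rows : List Int} {u v w : Int × Int} {p : Bool}
    (h : pvWalk rows u v p) (e : pvAdj rows v w) : pvWalk rows u w (!p) := by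
  induction h with
  | nil v => exact pvWalk.single e
  | cons a _ ih => exact pvWalk.cons a (ih e)

lemma pvWalk.trans {rows : List Int} {u v w : Int × Int} {p q : Bool}
    (h1 : pvWalk rows u v p) (h2 : pvWalk rows v w q) : pvWalk rows u w (p.xor q) := by
  induction h1 with
  | nil v => simpa using h2
  | cons a _ ih =>
    have := pvWalk.cons a (ih h2)
    have hx : ∀ x y : Bool, (!(x.xor y)) = ((!x).xor y) := by decide
    rwa [hx] at this

lemma pvWalk.symm {rows : List Int} {u v : Int × Int} {p : Bool}
    (h : pvWalk rows u v p) : pvWalk rows v u p := by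
  induction h with
  | nil v => exact pvWalk.nil v
  | cons a _ ih => exact ih.snoc (pvAdj_symm a)

lemma pvWalk.left_mem {rows : List Int} {u v : Int × Int} {p : Bool}
    (h : pvWalk rows u v p) (hne : u ≠ v ∨ p = true) : u ∈ pvCHORDS := by
  cases h with
  | nil => simp at hne
  | cons a _ => exact (pvAdj_chords a).1

lemma pvWalk.right_mem {rows : List Int} {u v : Int × Int} {p : Bool}
    (h : pvWalk rows u v p) (hne : u ≠ v ∨ p = true) : v ∈ pvCHORDS :=
  h.symm.left_mem (by rcases hne with h' | h' <;> [exact Or.inl (Ne.symm h'); exact Or.inr h'])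

-- ===================== Layer 4: the closure (port B) computes walk-parity reachability =====================

abbrev PvT := (Int × Int) × (Int × Int) × Int

def pvAllTriples : List PvT := pvCHORDS ×ˢ pvCHORDS ×ˢ ([0, 1] : List Int)

lemma mem_pvAllTriples {t : PvT} :
    t ∈ pvAllTriples ↔ t.1 ∈ pvCHORDS ∧ t.2.1 ∈ pvCHORDS ∧ (t.2.2 = 0 ∨ t.2.2 = 1) := by
  obtain ⟨a, b, c⟩ := t
  simp [pvAllTriples, List.mem_product]

lemma length_pvAllTriples : pvAllTriples.length = 1568 := by
  simp [pvAllTriples, List.length_product, length_pvCHORDS]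

lemma mem_pvStep_inner (edges : List ((Int × Int) × (Int × Int))) (t : PvT) :
    ∀ (acc : List PvT) (x : PvT),
      x ∈ edges.foldl (fun new e =>
        if t.2.1 == e.1 then PySem.Set.add new (t.1, e.2, 1 - t.2.2) else new) acc ↔
      x ∈ acc ∨ ∃ e ∈ edges, t.2.1 = e.1 ∧ x = (t.1, e.2, 1 - t.2.2) := by
  induction edges with
  | nil => simp
  | cons e es ih =>
    intro acc x
    simp only [List.foldl_cons]
    by_cases he : t.2.1 = e.1
    · rw [if_pos (show (t.2.1 == e.1) = true by simpa using he)]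
      simp only [ih, PySem.Set.mem_add, List.mem_cons]
      constructor
      · rintro ((h | h) | ⟨e', he', h1, h2⟩)
        · exact Or.inl h
        · exact Or.inr ⟨e, Or.inl rfl, he, h⟩
        · exact Or.inr ⟨e', Or.inr he', h1, h2⟩
      · rintro (h | ⟨e', (rfl | he'), h1, h2⟩)
        · exact Or.inl (Or.inl h)
        · exact Or.inl (Or.inr h2)
        · exact Or.inr ⟨e', he', h1, h2⟩
    · rw [if_neg (show ¬ (t.2.1 == e.1) = true by simpa using he)]
      simp only [ih, List.mem_cons]
      constructor
      · rintro (h | ⟨e', he', h1, h2⟩)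
        · exact Or.inl h
        · exact Or.inr ⟨e', Or.inr he', h1, h2⟩
      · rintro (h | ⟨e', (rfl | he'), h1, h2⟩)
        · exact Or.inl h
        · exact absurd h1 he
        · exact Or.inr ⟨e', he', h1, h2⟩

lemma nodup_pvStep_inner (edges : List ((Int × Int) × (Int × Int))) (t : PvT) :
    ∀ (acc : List PvT), acc.Nodup →
      (edges.foldl (fun new e =>
        if t.2.1 == e.1 then PySem.Set.add new (t.1, e.2, 1 - t.2.2) else new) acc).Nodup := by
  induction edges with
  | nil => exact fun acc h => h
  | cons e es ih =>
    intro acc h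
    simp only [List.foldl_cons]
    split
    · exact ih _ (PySem.Set.nodup_add _ _ h)
    · exact ih _ h

lemma mem_pvStep_outer (edges : List ((Int × Int) × (Int × Int))) :
    ∀ (l : List PvT) (acc : List PvT) (x : PvT),
      x ∈ l.foldl (fun new t => edges.foldl (fun new e =>
          if t.2.1 == e.1 then PySem.Set.add new (t.1, e.2, 1 - t.2.2) else new) new) acc ↔
      x ∈ acc ∨ ∃ t ∈ l, ∃ e ∈ edges, t.2.1 = e.1 ∧ x = (t.1, e.2, 1 - t.2.2) := by
  intro l
  induction l with
  | nil => simp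
  | cons t ts ih =>
    intro acc x
    simp only [List.foldl_cons, ih, mem_pvStep_inner, List.mem_cons]
    constructor
    · rintro ((h | h) | h)
      · exact Or.inl h
      · obtain ⟨e, he, h1, h2⟩ := h
        exact Or.inr ⟨t, Or.inl rfl, e, he, h1, h2⟩
      · obtain ⟨t', ht', rest⟩ := h
        exact Or.inr ⟨t', Or.inr ht', rest⟩
    · rintro (h | ⟨t', (rfl | ht'), rest⟩)
      · exact Or.inl (Or.inl h)
      · exact Or.inl (Or.inr rest)
      · exact Or.inr ⟨t', ht', rest⟩

lemma mem_pvStep (edges : List ((Int × Int) × (Int × Int))) (reach : List PvT) (x : PvT) :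
    x ∈ pvStep edges reach ↔
      x ∈ reach ∨ ∃ t ∈ reach, ∃ e ∈ edges, t.2.1 = e.1 ∧ x = (t.1, e.2, 1 - t.2.2) :=
  mem_pvStep_outer edges reach reach x

lemma nodup_pvStep_outer (edges : List ((Int × Int) × (Int × Int))) :
    ∀ (l : List PvT) (acc : List PvT), acc.Nodup →
      (l.foldl (fun new t => edges.foldl (fun new e =>
          if t.2.1 == e.1 then PySem.Set.add new (t.1, e.2, 1 - t.2.2) else new) new) acc).Nodup := by
  intro l
  induction l with
  | nil => exact fun acc h => h
  | cons t ts ih =>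
    intro acc h
    exact ih _ (nodup_pvStep_inner edges t acc h)

lemma nodup_pvStep (edges : List ((Int × Int) × (Int × Int))) (reach : List PvT)
    (h : reach.Nodup) : (pvStep edges reach).Nodup :=
  nodup_pvStep_outer edges reach reach h

lemma pvStep_subset (edges : List ((Int × Int) × (Int × Int))) (reach : List PvT) :
    reach ⊆ pvStep edges reach := fun x hx => (mem_pvStep edges reach x).mpr (Or.inl hx)

lemma pvStep_stop (edges : List ((Int × Int) × (Int × Int))) (reach : List PvT)
    (hnd : reach.Nodup)
    (hlen : (pvStep edges reach).length ≤ reach.length) :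
    ∀ x ∈ pvStep edges reach, x ∈ reach := by
  have hsub := List.subperm_of_subset hnd (pvStep_subset edges reach)
  have hperm := hsub.perm_of_length_le hlen
  exact fun x hx => hperm.mem_iff.mpr hx

lemma pvClosure_inv (edges : List ((Int × Int) × (Int × Int))) (Q : PvT → Prop)
    (hQ : ∀ t e, Q t → e ∈ edges → t.2.1 = e.1 → Q (t.1, e.2, 1 - t.2.2)) :
    ∀ (fuel : Nat) (reach : List PvT), (∀ t ∈ reach, Q t) →
      ∀ t ∈ pvClosure edges fuel reach, Q t := by
  intro fuel
  induction fuel with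
  | zero => exact fun reach h => h
  | succ n ih =>
    intro reach h
    simp only [pvClosure]
    split
    · exact h
    · refine ih _ (fun t ht => ?_)
      rcases (mem_pvStep edges reach t).mp ht with h' | ⟨t', ht', e, he, h1, h2⟩
      · exact h t h'
      · exact h2 ▸ hQ t' e (h t' ht') he h1

lemma pvClosure_subset (edges : List ((Int × Int) × (Int × Int))) :
    ∀ (fuel : Nat) (reach : List PvT), reach ⊆ pvClosure edges fuel reach := by
  intro fuel
  induction fuel with
  | zero => exact fun reach => List.Subset.refl _
  | succ n ih =>
    intro reach
    simp only [pvClosure]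
    split
    · exact List.Subset.refl _
    · exact fun x hx => ih _ (pvStep_subset edges reach hx)

lemma pvClosure_closed (edges : List ((Int × Int) × (Int × Int)))
    (hE : ∀ e ∈ edges, e.1 ∈ pvCHORDS ∧ e.2 ∈ pvCHORDS) :
    ∀ (fuel : Nat) (reach : List PvT), reach.Nodup → (∀ t ∈ reach, t ∈ pvAllTriples) →
      1568 < fuel + reach.length →
      (pvClosure edges fuel reach).Nodup ∧
      ∀ t ∈ pvClosure edges fuel reach, ∀ e ∈ edges, t.2.1 = e.1 →
        (t.1, e.2, 1 - t.2.2) ∈ pvClosure edges fuel reach := by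
  intro fuel
  induction fuel with
  | zero =>
    intro reach hnd hsub hlt
    exfalso
    have : reach.length ≤ 1568 := by
      have := (List.subperm_of_subset hnd (fun t ht => hsub t ht)).length_le
      rwa [length_pvAllTriples] at this
    omega
  | succ n ih =>
    intro reach hnd hsub hlt
    simp only [pvClosure]
    split
    · rename_i hstop
      have hlen : (pvStep edges reach).length ≤ reach.length := by
        have : PySem.Set.len (pvStep edges reach) = PySem.Set.len reach := by
          simpa using hstop
        simp only [PySem.Set.len] at this
        omega
      exact ⟨hnd, fun t ht e he h1 =>
        pvStep_stop edges reach hnd hlen _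
          ((mem_pvStep edges reach _).mpr (Or.inr ⟨t, ht, e, he, h1, rfl⟩))⟩
    · rename_i hgo
      have hndn := nodup_pvStep edges reach hnd
      have hsubn : ∀ t ∈ pvStep edges reach, t ∈ pvAllTriples := by
        intro t ht
        rcases (mem_pvStep edges reach t).mp ht with h' | ⟨t', ht', e, he, h1, h2⟩
        · exact hsub t h'
        · have h3 := hsub t' ht'
          rw [mem_pvAllTriples] at h3 ⊢
          subst h2
          refine ⟨h3.1, (hE e he).2, ?_⟩
          rcases h3.2.2 with h | h <;> simp [h]
      have hmono : reach.length < (pvStep edges reach).length := by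
        have hle := (List.subperm_of_subset hnd (pvStep_subset edges reach)).length_le
        have hne : (pvStep edges reach).length ≠ reach.length := by
          intro h
          apply hgo
          simp [PySem.Set.len, h]
        omega
      exact ih _ hndn hsubn (by omega)

-- ===================== Layer 5: port B equals the specification =====================

lemma pvEdges_chords {rows : List Int} : ∀ e ∈ pvEdges rows, e.1 ∈ pvCHORDS ∧ e.2 ∈ pvCHORDS := by
  intro e he
  exact pvAdj_chords (show pvAdj rows e.1 e.2 from he)

def pvInit : List PvT := PySem.Set.ofList (pvCHORDS.map (fun v => (v, v, (0 : Int))))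

lemma pvInit_eq : pvInit = pvCHORDS.map (fun v => (v, v, (0 : Int))) := by
  unfold pvInit
  refine PySem.Set.ofList_eq_self_of_nodup _ ?_
  exact nodup_pvCHORDS.map (fun a b h => by simpa using congrArg (fun t : PvT => t.1) h)

lemma mem_pvInit {t : PvT} : t ∈ pvInit ↔ t.1 ∈ pvCHORDS ∧ t.2.1 = t.1 ∧ t.2.2 = 0 := by
  rw [pvInit_eq]
  obtain ⟨a, b, c⟩ := t
  simp only [List.mem_map, Prod.mk.injEq]
  constructor
  · rintro ⟨v, hv, rfl, rfl, rfl⟩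
    exact ⟨hv, rfl, rfl⟩
  · rintro ⟨hv, rfl, rfl⟩
    exact ⟨_, hv, rfl, rfl, rfl⟩

-- the closure set computed by port B
def pvR (rows : List Int) : List PvT := pvClosure (pvEdges rows) 1600 pvInit

lemma pvInit_nodup : pvInit.Nodup := by
  rw [pvInit_eq]
  exact nodup_pvCHORDS.map (fun a b h => by simpa using congrArg (fun t : PvT => t.1) h)

lemma pvInit_all : ∀ t ∈ pvInit, t ∈ pvAllTriples := by
  intro t ht
  rw [mem_pvInit] at ht
  rw [mem_pvAllTriples]
  exact ⟨ht.1, ht.2.1 ▸ ht.1, Or.inl ht.2.2⟩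

lemma pvR_init {rows : List Int} : ∀ t ∈ pvInit, t ∈ pvR rows :=
  fun t ht => pvClosure_subset (pvEdges rows) 1600 pvInit ht

lemma pvR_closed {rows : List Int} :
    ∀ t ∈ pvR rows, ∀ e ∈ pvEdges rows, t.2.1 = e.1 → (t.1, e.2, 1 - t.2.2) ∈ pvR rows :=
  (pvClosure_closed (pvEdges rows) pvEdges_chords 1600 pvInit pvInit_nodup pvInit_all
    (by omega)).2

lemma pvR_sound {rows : List Int} :
    ∀ t ∈ pvR rows, pvWalk rows t.1 t.2.1 (t.2.2 == 1) ∧ (t.2.2 = 0 ∨ t.2.2 = 1) := by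
  refine pvClosure_inv (pvEdges rows)
    (fun t => pvWalk rows t.1 t.2.1 (t.2.2 == 1) ∧ (t.2.2 = 0 ∨ t.2.2 = 1)) ?_ 1600 pvInit ?_
  · rintro ⟨u, v, p⟩ ⟨x, y⟩ ⟨hw, hp⟩ he h1
    simp only at h1 hw ⊢
    subst h1
    have hadj : pvAdj rows v y := he
    have := hw.snoc hadj
    constructor
    · rcases hp with rfl | rfl
      · simpa using this
      · simpa using this
    · rcases hp with rfl | rfl <;> simp
  · intro t ht
    rw [mem_pvInit] at ht
    obtain ⟨h1, h2, h3⟩ := ht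
    refine ⟨?_, Or.inl h3⟩
    rw [h3, h2]
    exact (by simpa using pvWalk.nil t.1)

lemma pvR_complete_aux {rows : List Int} {v w : Int × Int} {q : Bool}
    (hw : pvWalk rows v w q) :
    ∀ (u : Int × Int) (p : Int), (u, v, p) ∈ pvR rows → (p = 0 ∨ p = 1) →
      (u, w, if (p == 1).xor q then 1 else 0) ∈ pvR rows := by
  induction hw with
  | nil x =>
    intro u p hp h01
    rcases h01 with rfl | rfl <;> simpa using hp
  | @cons x y z q' a h ih =>
    intro u p hp h01
    have hstep := pvR_closed (u, x, p) hp (x, y) a rfl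
    have hnext := ih u (1 - p) hstep (by rcases h01 with rfl | rfl <;> simp)
    rcases h01 with rfl | rfl <;> simpa using hnext

lemma pvR_complete {rows : List Int} {u w : Int × Int} {q : Bool}
    (hu : u ∈ pvCHORDS) (hw : pvWalk rows u w q) :
    (u, w, if q then (1 : Int) else 0) ∈ pvR rows := by
  have h0 : ((u, u, 0) : PvT) ∈ pvR rows :=
    pvR_init _ (mem_pvInit.mpr ⟨hu, rfl, rfl⟩)
  have := pvR_complete_aux hw u 0 h0 (Or.inl rfl)
  simpa using this

lemma pvAlt_true_iff (rows : List Int) :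
    passes_forced_perpendicularity_filter_alt rows = true ↔ pvOk rows := by
  simp only [passes_forced_perpendicularity_filter_alt]
  rw [show pvClosure (pvEdges rows) 1600
      (PySem.Set.ofList (pvCHORDS.map (fun v => (v, v, (0 : Int))))) = pvR rows from rfl]
  constructor
  · intro h
    by_cases h1 : pvCHORDS.any (fun v => PySem.Set.contains (pvR rows) (v, v, 1))
    · rw [if_pos h1] at h; exact absurd h (by simp)
    · rw [if_neg h1] at h
      by_cases h2 : pvCHORDS.any (fun u => pvCHORDS.any (fun v =>
          decide (u ≠ v) && PySem.Set.contains (pvR rows) (u, v, 0) &&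
          decide (PySem.Int.band (pvMask u) (pvMask v) ≠ 0)))
      · rw [if_pos h2] at h; exact absurd h (by simp)
      · constructor
        · intro v hv
          have hvC : v ∈ pvCHORDS := hv.left_mem (Or.inr rfl)
          have hmem := pvR_complete hvC hv
          simp only [List.any_eq_true, PySem.Set.contains_iff, not_exists, not_and] at h1
          exact h1 v hvC (by simpa using hmem)
        · intro u v huv hw
          have huC : u ∈ pvCHORDS := hw.left_mem (Or.inl huv)
          have hvC : v ∈ pvCHORDS := hw.right_mem (Or.inl huv)
          have hmem : ((u, v, (0 : Int)) : PvT) ∈ pvR rows := by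
            simpa using pvR_complete huC hw
          by_contra hband
          apply h2
          rw [List.any_eq_true]
          refine ⟨u, huC, ?_⟩
          rw [List.any_eq_true]
          refine ⟨v, hvC, ?_⟩
          simp only [Bool.and_eq_true, decide_eq_true_eq, PySem.Set.contains_iff]
          exact ⟨⟨huv, hmem⟩, hband⟩
  · rintro ⟨hbip, hconf⟩
    have h1 : pvCHORDS.any (fun v => PySem.Set.contains (pvR rows) (v, v, 1)) = false := by
      rw [List.any_eq_false]
      intro v hv
      simp only [PySem.Set.contains_iff]
      intro hmem
      have := (pvR_sound _ hmem).1
      exact absurd (by simpa using this) (hbip v)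
    have h2 : pvCHORDS.any (fun u => pvCHORDS.any (fun v =>
        decide (u ≠ v) && PySem.Set.contains (pvR rows) (u, v, 0) &&
        decide (PySem.Int.band (pvMask u) (pvMask v) ≠ 0))) = false := by
      rw [List.any_eq_false]
      intro u hu
      rw [Bool.not_eq_true, List.any_eq_false]
      intro v hv
      rw [Bool.not_eq_true]
      by_contra hcon
      rw [Bool.not_eq_false] at hcon
      simp only [Bool.and_eq_true, decide_eq_true_eq, PySem.Set.contains_iff] at hcon
      obtain ⟨⟨hne, hmem⟩, hband⟩ := hcon
      have := (pvR_sound _ hmem).1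
      exact hband (hconf u v hne (by simpa using this))
    rw [h1, h2]
    simp

-- ===================== Layer 6: endpoint-mask check characterization =====================

lemma pvNat_or_eq_zero {x y : Nat} : (x ||| y) = 0 ↔ x = 0 ∧ y = 0 := by
  constructor
  · intro h
    have h1 : x ≤ x ||| y := Nat.left_le_or
    have h2 : y ≤ x ||| y := Nat.right_le_or
    omega
  · rintro ⟨rfl, rfl⟩
    rfl



lemma pvBand_bor_zero {a b c : Int} (ha : 0 ≤ a) (hb : 0 ≤ b) (hc : 0 ≤ c) :
    PySem.Int.band a (PySem.Int.bor b c) = 0 ↔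
      PySem.Int.band a b = 0 ∧ PySem.Int.band a c = 0 := by
  rw [PySem.Int.bor_of_nonneg hb hc,
    PySem.Int.band_of_nonneg ha (by positivity),
    PySem.Int.band_of_nonneg ha hb, PySem.Int.band_of_nonneg ha hc]
  simp only [Int.toNat_natCast]
  rw [Nat.and_or_distrib_left]
  constructor
  · intro h
    have := pvNat_or_eq_zero.mp (by exact_mod_cast h)
    exact ⟨by exact_mod_cast this.1, by exact_mod_cast this.2⟩
  · rintro ⟨h1, h2⟩
    have : (a.toNat &&& b.toNat) = 0 ∧ (a.toNat &&& c.toNat) = 0 :=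
      ⟨by exact_mod_cast h1, by exact_mod_cast h2⟩
    exact_mod_cast pvNat_or_eq_zero.mpr this

lemma pvMask_nonneg (e : Int × Int) : 0 ≤ pvMask e := by
  unfold pvMask
  rw [PySem.Int.bor_of_nonneg] <;> positivity

lemma pvEpLoop_char (color : PySem.Dict (Int × Int) Int) :
    ∀ (l : List (Int × Int)) (m0 m1 : Int), 0 ≤ m0 → 0 ≤ m1 →
    (∀ x ∈ l, color.getD x 0 = 0 ∨ color.getD x 0 = 1) →
    (pvEpLoop color l [m0, m1] = true ↔
      ((∀ x ∈ l, PySem.Int.band (pvMask x) (if color.getD x 0 = 0 then m0 else m1) = 0) ∧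
       l.Pairwise (fun x y => color.getD x 0 = color.getD y 0 →
         PySem.Int.band (pvMask x) (pvMask y) = 0))) := by
  intro l
  induction l with
  | nil => intro m0 m1 _ _ _; simp [pvEpLoop]
  | cons e rest ih =>
    intro m0 m1 hm0 hm1 h01
    have hce := h01 e (by simp)
    have hrest01 : ∀ x ∈ rest, color.getD x 0 = 0 ∨ color.getD x 0 = 1 :=
      fun x hx => h01 x (by simp [hx])
    rcases hce with hc0 | hc1
    · -- colour of e is 0
      have hget : PySem.List.pyGetD [m0, m1] (color.getD e 0) 0 = m0 := by
        rw [hc0]; rfl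
      have hset : PySem.List.pySetD [m0, m1] (color.getD e 0)
          (PySem.Int.bor m0 (pvMask e)) = [PySem.Int.bor m0 (pvMask e), m1] := by
        rw [hc0]; rfl
      simp only [pvEpLoop, hget]
      by_cases hband : PySem.Int.band m0 (pvMask e) ≠ 0
      · rw [if_pos hband]
        constructor
        · intro h; exact absurd h (by simp)
        · rintro ⟨hall, -⟩
          have := hall e (by simp)
          rw [if_pos hc0, PySem.Int.band_comm] at this
          exact absurd this hband
      · rw [if_neg hband, hset]
        push_neg at hband
        rw [ih _ _ (by rw [PySem.Int.bor_of_nonneg hm0 (pvMask_nonneg e)]; positivity) hm1 hrest01]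
        simp only [List.forall_mem_cons, List.pairwise_cons]
        constructor
        · rintro ⟨hall, hpw⟩
          refine ⟨⟨?_, ?_⟩, ?_, hpw⟩
          · rw [if_pos hc0, PySem.Int.band_comm]; exact hband
          · intro x hx
            have := hall x hx
            rcases hrest01 x hx with hx0 | hx1
            · rw [if_pos hx0] at this ⊢
              exact ((pvBand_bor_zero (pvMask_nonneg x) hm0 (pvMask_nonneg e)).mp this).1
            · rwa [if_neg (by omega)] at this ⊢
          · intro y hy hcy
            have := hall y hy
            rw [if_pos (by omega : color.getD y 0 = 0)] at this
            have h2 := ((pvBand_bor_zero (pvMask_nonneg y) hm0 (pvMask_nonneg e)).mp this).2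
            rw [PySem.Int.band_comm] at h2
            exact h2
        · rintro ⟨⟨-, hall⟩, hehead, hpw⟩
          refine ⟨fun x hx => ?_, hpw⟩
          rcases hrest01 x hx with hx0 | hx1
          · rw [if_pos hx0]
            refine (pvBand_bor_zero (pvMask_nonneg x) hm0 (pvMask_nonneg e)).mpr ⟨?_, ?_⟩
            · have := hall x hx; rwa [if_pos hx0] at this
            · have := hehead x hx (by omega)
              rwa [PySem.Int.band_comm] at this
          · rw [if_neg (by omega)]
            have := hall x hx; rwa [if_neg (by omega)] at this
    · -- colour of e is 1 (mirror case)
      have hget : PySem.List.pyGetD [m0, m1] (color.getD e 0) 0 = m1 := by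
        rw [hc1]; rfl
      have hset : PySem.List.pySetD [m0, m1] (color.getD e 0)
          (PySem.Int.bor m1 (pvMask e)) = [m0, PySem.Int.bor m1 (pvMask e)] := by
        rw [hc1]; rfl
      simp only [pvEpLoop, hget]
      by_cases hband : PySem.Int.band m1 (pvMask e) ≠ 0
      · rw [if_pos hband]
        constructor
        · intro h; exact absurd h (by simp)
        · rintro ⟨hall, -⟩
          have := hall e (by simp)
          rw [if_neg (by omega), PySem.Int.band_comm] at this
          exact absurd this hband
      · rw [if_neg hband, hset]
        push_neg at hband
        rw [ih _ _ hm0 (by rw [PySem.Int.bor_of_nonneg hm1 (pvMask_nonneg e)]; positivity) hrest01]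
        simp only [List.forall_mem_cons, List.pairwise_cons]
        constructor
        · rintro ⟨hall, hpw⟩
          refine ⟨⟨?_, ?_⟩, ?_, hpw⟩
          · rw [if_neg (by omega), PySem.Int.band_comm]; exact hband
          · intro x hx
            have := hall x hx
            rcases hrest01 x hx with hx0 | hx1
            · rwa [if_pos hx0] at this ⊢
            · rw [if_neg (by omega)] at this ⊢
              exact ((pvBand_bor_zero (pvMask_nonneg x) hm1 (pvMask_nonneg e)).mp this).1
          · intro y hy hcy
            have := hall y hy
            rw [if_neg (by omega : ¬ color.getD y 0 = 0)] at this
            have h2 := ((pvBand_bor_zero (pvMask_nonneg y) hm1 (pvMask_nonneg e)).mp this).2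
            rw [PySem.Int.band_comm] at h2
            exact h2
        · rintro ⟨⟨-, hall⟩, hehead, hpw⟩
          refine ⟨fun x hx => ?_, hpw⟩
          rcases hrest01 x hx with hx0 | hx1
          · rw [if_pos hx0]
            have := hall x hx; rwa [if_pos hx0] at this
          · rw [if_neg (by omega)]
            refine (pvBand_bor_zero (pvMask_nonneg x) hm1 (pvMask_nonneg e)).mpr ⟨?_, ?_⟩
            · have := hall x hx; rwa [if_neg (by omega)] at this
            · have := hehead x hx (by omega)
              rwa [PySem.Int.band_comm] at this

-- ===================== Layer 7: the neighbour scan =====================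

lemma pvVisit_none {current : Int × Int} :
    ∀ (nbrs : List (Int × Int)) (color : PySem.Dict (Int × Int) Int)
      (q comp : List (Int × Int)),
    nbrs.Nodup → color.contains current = true →
    pvVisit current nbrs color q comp = none →
    ∃ n ∈ nbrs, color.contains n = true ∧ color.getD n 0 = color.getD current 0 := by
  intro nbrs
  induction nbrs with
  | nil => intro color q comp _ _ h; simp [pvVisit] at h
  | cons n rest ih =>
    intro color q comp hnd hcur h
    rw [pvVisit] at h
    by_cases hn : color.contains n = false
    · rw [if_pos hn] at h
      have hne : current ≠ n := fun he => by rw [← he] at hn; rw [hcur] at hn; cases hn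
      obtain ⟨m, hm, hmc, hmv⟩ := ih _ _ _ (List.nodup_cons.mp hnd).2
        (by rw [PySem.Dict.contains_insert]; simp [hcur]) h
      have hmn : m ≠ n := fun he => (List.nodup_cons.mp hnd).1 (he ▸ hm)
      refine ⟨m, by simp [hm], ?_, ?_⟩
      · rw [PySem.Dict.contains_insert] at hmc
        simpa [beq_iff_eq, hmn] using hmc
      · rwa [PySem.Dict.getD_insert_of_ne _ _ _ hmn,
          PySem.Dict.getD_insert_of_ne _ _ _ hne] at hmv
    · rw [if_neg hn] at h
      rw [Bool.not_eq_false] at hn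
      by_cases hv : color.getD n 0 == color.getD current 0
      · exact ⟨n, by simp, hn, by simpa using hv⟩
      · rw [if_neg (by simpa using hv)] at h
        obtain ⟨m, hm, hmc, hmv⟩ := ih _ _ _ (List.nodup_cons.mp hnd).2 hcur h
        exact ⟨m, by simp [hm], hmc, hmv⟩

lemma pvVisit_some {current : Int × Int} :
    ∀ (nbrs : List (Int × Int)) (color : PySem.Dict (Int × Int) Int)
      (q comp : List (Int × Int)) color' q' comp',
    nbrs.Nodup → color.contains current = true →
    pvVisit current nbrs color q comp = some (color', q', comp') →
    ∃ Δ : List (Int × Int),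
      q' = q ++ Δ ∧ comp' = comp ++ Δ ∧ Δ.Nodup ∧
      (∀ v ∈ Δ, v ∈ nbrs ∧ color.contains v = false) ∧
      (∀ v, color.contains v = true → color'.get? v = color.get? v) ∧
      (∀ v, color'.contains v = true ↔ color.contains v = true ∨ v ∈ Δ) ∧
      (∀ v ∈ Δ, color'.getD v 0 = 1 - color.getD current 0) ∧
      (∀ n ∈ nbrs, color'.contains n = true) ∧
      (∀ n ∈ nbrs, color.contains n = true → color.getD n 0 ≠ color.getD current 0) := by
  intro nbrs
  induction nbrs with
  | nil =>
    intro color q comp color' q' comp' _ _ h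
    rw [pvVisit] at h
    simp only [Option.some.injEq, Prod.mk.injEq] at h
    obtain ⟨rfl, rfl, rfl⟩ := h
    exact ⟨[], by simp, by simp, List.nodup_nil, by simp, fun v _ => rfl,
      by simp, by simp, by simp, by simp⟩
  | cons n rest ih =>
    intro color q comp color' q' comp' hnd hcur h
    have hndr := (List.nodup_cons.mp hnd).2
    have hnr := (List.nodup_cons.mp hnd).1
    rw [pvVisit] at h
    by_cases hn : color.contains n = false
    · rw [if_pos hn] at h
      have hne : current ≠ n := fun he => by rw [← he] at hn; rw [hcur] at hn; cases hn
      set colorI := color.insert n (1 - color.getD current 0) with hcolorI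
      obtain ⟨Δ, hq, hcomp, hΔnd, hΔold, hpres, hcont, hval, hall, hchk⟩ :=
        ih colorI _ _ _ _ _ hndr
          (by rw [PySem.Dict.contains_insert]; simp [hcur]) h
      have hΔn : n ∉ Δ := fun hmem => by
        have := (hΔold n hmem).2
        rw [PySem.Dict.contains_insert] at this
        simp at this
      refine ⟨n :: Δ, by simpa using hq, by simpa using hcomp,
        List.nodup_cons.mpr ⟨hΔn, hΔnd⟩, ?_, ?_, ?_, ?_, ?_, ?_⟩
      · intro v hv0
        rcases List.mem_cons.mp hv0 with rfl | hv
        · exact ⟨by simp, hn⟩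
        · obtain ⟨h1, h2⟩ := hΔold v hv
          have hvn : v ≠ n := fun he => by
            rw [he, PySem.Dict.contains_insert] at h2; simp at h2
          refine ⟨by simp [h1], ?_⟩
          rw [PySem.Dict.contains_insert] at h2
          simpa [hvn] using h2
      · intro v hv
        have hvn : v ≠ n := fun he => by rw [he, hn] at hv; cases hv
        rw [hpres v (by rw [PySem.Dict.contains_insert]; simp [hv]),
          PySem.Dict.get?_insert_of_ne _ _ hvn]
      · intro v
        rw [hcont v, PySem.Dict.contains_insert]
        constructor
        · rintro (h' | h')
          · rcases (by simpa using h' : v = n ∨ color.contains v = true) with rfl | h''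
            · exact Or.inr (by simp)
            · exact Or.inl h''
          · exact Or.inr (by simp [h'])
        · rintro (h' | h')
          · exact Or.inl (by simp [h'])
          · rcases (by simpa using h' : v = n ∨ v ∈ Δ) with rfl | h''
            · exact Or.inl (by simp)
            · exact Or.inr h''
      · intro v hv0
        rcases List.mem_cons.mp hv0 with rfl | hv
        · have : colorI.get? v = some (1 - color.getD current 0) := by
            rw [hcolorI, PySem.Dict.get?_insert_self]
          rw [PySem.Dict.getD_eq_get?_getD, hpres v
              (by rw [PySem.Dict.contains_insert]; simp), this]
          rfl
        · rw [hval v hv, hcolorI, PySem.Dict.getD_insert_of_ne _ _ _ hne]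
      · intro v hv0
        rcases List.mem_cons.mp hv0 with rfl | hv
        · rw [hcont v, PySem.Dict.contains_insert]
          exact Or.inl (by simp)
        · exact hall v hv
      · intro v hv0
        rcases List.mem_cons.mp hv0 with rfl | hv
        · intro hvc; rw [hvc] at hn; cases hn
        · intro hvc
          have := hchk v hv (by rw [PySem.Dict.contains_insert]; simp [hvc])
          have hvn : v ≠ n := fun he => by rw [he, hn] at hvc; cases hvc
          rwa [PySem.Dict.getD_insert_of_ne _ _ _ hvn,
            PySem.Dict.getD_insert_of_ne _ _ _ hne] at this
    · rw [if_neg hn] at h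
      rw [Bool.not_eq_false] at hn
      by_cases hv : color.getD n 0 == color.getD current 0
      · rw [if_pos hv] at h; cases h
      · rw [if_neg hv] at h
        obtain ⟨Δ, hq, hcomp, hΔnd, hΔold, hpres, hcont, hval, hall, hchk⟩ :=
          ih color _ _ _ _ _ hndr hcur h
        refine ⟨Δ, hq, hcomp, hΔnd,
          fun v hv' => ⟨List.mem_cons_of_mem _ (hΔold v hv').1, (hΔold v hv').2⟩,
          hpres, hcont, hval, ?_, ?_⟩
        · intro m hm0
          rcases List.mem_cons.mp hm0 with rfl | hm
          · rw [hcont m]; exact Or.inl hn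
          · exact hall m hm
        · intro m hm0
          rcases List.mem_cons.mp hm0 with rfl | hm
          · intro _; simpa using hv
          · exact hchk m hm

-- ===================== Layer 8: the BFS loop =====================

-- invariant of the `while q:` loop
def pvInvV (rows : List Int) (d0 color : PySem.Dict (Int × Int) Int) (start : Int × Int)
    (q comp : List (Int × Int)) : Prop :=
  (∃ done, comp = done ++ q ∧
     ∀ u ∈ done, ∀ v, pvAdj rows u v →
       color.contains v = true ∧ color.getD v 0 ≠ color.getD u 0) ∧
  (∀ v, color.contains v = true ↔ d0.contains v = true ∨ v ∈ comp) ∧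
  (∀ v ∈ comp, d0.contains v = false ∧ v ∈ pvCHORDS ∧
     pvWalk rows start v (color.getD v 0 == 1) ∧
     (color.getD v 0 = 0 ∨ color.getD v 0 = 1)) ∧
  (∀ v, d0.contains v = true → color.get? v = d0.get? v) ∧
  comp.Nodup ∧ start ∈ comp

-- what holds of the colouring and component when the loop drains its queue
def pvPost (rows : List Int) (d0 color' : PySem.Dict (Int × Int) Int) (start : Int × Int)
    (comp' : List (Int × Int)) : Prop :=
  (∀ v, color'.contains v = true ↔ d0.contains v = true ∨ v ∈ comp') ∧
  (∀ v, d0.contains v = true → color'.get? v = d0.get? v) ∧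
  (∀ v ∈ comp', d0.contains v = false ∧ v ∈ pvCHORDS ∧
     pvWalk rows start v (color'.getD v 0 == 1) ∧
     (color'.getD v 0 = 0 ∨ color'.getD v 0 = 1)) ∧
  comp'.Nodup ∧ start ∈ comp' ∧
  (∀ u ∈ comp', ∀ v, pvAdj rows u v →
     color'.contains v = true ∧ color'.getD v 0 ≠ color'.getD u 0)

lemma pvBFS_spec (rows : List Int) (g : PySem.Dict (Int × Int) (PySem.Set (Int × Int)))
    (hg : ∀ u v, v ∈ g.getD u PySem.Set.empty ↔ pvAdj rows u v)
    (hgnd : ∀ u, (g.getD u PySem.Set.empty).Nodup)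
    (d0 : PySem.Dict (Int × Int) Int)
    (hd0 : ∀ u v, d0.contains u = true → pvAdj rows u v → d0.contains v = true)
    (start : Int × Int) :
    ∀ (fuel : Nat) (color : PySem.Dict (Int × Int) Int) (q comp : List (Int × Int)),
      pvInvV rows d0 color start q comp →
      q.length + 28 < fuel + comp.length →
      (pvBFS g fuel color q comp = none → ∃ w, pvWalk rows w w true) ∧
      (∀ color' comp', pvBFS g fuel color q comp = some (color', comp') →
        pvPost rows d0 color' start comp') := by
  intro fuel
  induction fuel with
  | zero =>
    intro color q comp hinv hfuel
    exfalso
    obtain ⟨-, -, h3, -, hnd, -⟩ := hinv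
    have hsub : comp ⊆ pvCHORDS := fun v hv => (h3 v hv).2.1
    have hlen : comp.length ≤ 28 := by
      have := (List.subperm_of_subset hnd hsub).length_le
      rwa [length_pvCHORDS] at this
    omega
  | succ fuel ih =>
    intro color q comp hinv hfuel
    obtain ⟨⟨done, hdq, hdone⟩, h2, h3, h4, hnd, hstart⟩ := hinv
    match hq : q with
    | [] =>
      constructor
      · intro h; rw [pvBFS] at h; cases h
      · intro color' comp' h
        rw [pvBFS] at h
        simp only [Option.some.injEq, Prod.mk.injEq] at h
        obtain ⟨rfl, rfl⟩ := h
        subst hq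
        rw [List.append_nil] at hdq
        subst hdq
        exact ⟨h2, h4, h3, hnd, hstart, hdone⟩
    | current :: qrest =>
      subst hq
      have hcurcomp : current ∈ comp := by rw [hdq]; simp
      have hcurcol : color.contains current = true := (h2 current).mpr (Or.inr hcurcomp)
      have hndn := hgnd current
      rw [pvBFS]
      match hv : pvVisit current (g.getD current PySem.Set.empty) color qrest comp with
      | none =>
        obtain ⟨n, hn, hnc, hnv⟩ := pvVisit_none _ color qrest comp hndn hcurcol hv
        have hadj : pvAdj rows current n := (hg current n).mp hn
        have hncomp : n ∈ comp := by
          rcases (h2 n).mp hnc with hd | hc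
          · exfalso
            have := hd0 n current hd (pvAdj_symm hadj)
            exact absurd this (by rw [(h3 current hcurcomp).1]; simp)
          · exact hc
        have wcur := (h3 current hcurcomp).2.2.1
        have wn := (h3 n hncomp).2.2.1
        refine ⟨fun _ => ⟨start, ?_⟩, fun color' comp' h => by cases h⟩
        have hw1 : pvWalk rows start n (!(color.getD current 0 == 1)) := wcur.snoc hadj
        have hw2 : pvWalk rows n start (color.getD n 0 == 1) := wn.symm
        have := hw1.trans hw2
        rw [hnv] at this
        simpa using this
      | some res =>
        obtain ⟨colorI, qI, compI⟩ := res
        obtain ⟨Δ, hqI, hcompI, hΔnd, hΔold, hpres, hcont, hval, hall, hchk⟩ :=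
          pvVisit_some _ color qrest comp colorI qI compI hndn hcurcol hv
        have hpresD : ∀ v, color.contains v = true → colorI.getD v 0 = color.getD v 0 := by
          intro v hv'
          rw [PySem.Dict.getD_eq_get?_getD, hpres v hv', ← PySem.Dict.getD_eq_get?_getD]
        have hcurI : colorI.getD current 0 = color.getD current 0 := hpresD current hcurcol
        have hΔnotcomp : ∀ v ∈ Δ, v ∉ comp := by
          intro v hv' hvc
          have := (hΔold v hv').2
          rw [(h2 v).mpr (Or.inr hvc)] at this
          cases this
        have hcur01 := (h3 current hcurcomp).2.2.2
        -- the new invariant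
        have hinv' : pvInvV rows d0 colorI start qI compI := by
          refine ⟨⟨done ++ [current], by rw [hcompI, hqI, hdq]; simp, ?_⟩, ?_, ?_, ?_, ?_, ?_⟩
          · intro u hu v hadj
            rcases List.mem_append.mp hu with hu | hu
            · have hold := hdone u hu v hadj
              have hucomp : u ∈ comp := by rw [hdq]; exact List.mem_append.mpr (Or.inl hu)
              have hucol : color.contains u = true := (h2 u).mpr (Or.inr hucomp)
              refine ⟨(hcont v).mpr (Or.inl hold.1), ?_⟩
              rw [hpresD v hold.1, hpresD u hucol]
              exact hold.2
            · have hu' := List.mem_singleton.mp hu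
              rw [hu'] at hadj ⊢
              have hnmem : v ∈ g.getD current PySem.Set.empty := (hg current v).mpr hadj
              refine ⟨hall v hnmem, ?_⟩
              rw [hcurI]
              by_cases hvcol : color.contains v = true
              · rw [hpresD v hvcol]
                exact hchk v hnmem hvcol
              · have hvΔ : v ∈ Δ := by
                  rcases (hcont v).mp (hall v hnmem) with h' | h'
                  · exact absurd h' hvcol
                  · exact h'
                rw [hval v hvΔ]
                rcases hcur01 with h0 | h0 <;> omega
          · intro v
            rw [hcont v, h2 v, hcompI]
            simp [List.mem_append, or_assoc]
          · intro v hvmem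
            rw [hcompI] at hvmem
            rcases List.mem_append.mp hvmem with hvc | hvΔ
            · have hvcol : color.contains v = true := (h2 v).mpr (Or.inr hvc)
              obtain ⟨hA, hB, hC, hD⟩ := h3 v hvc
              rw [hpresD v hvcol]
              exact ⟨hA, hB, hC, hD⟩
            · have hnmem : v ∈ g.getD current PySem.Set.empty := (hΔold v hvΔ).1
              have hadj : pvAdj rows current v := (hg current v).mp hnmem
              refine ⟨?_, (pvAdj_chords hadj).2, ?_, ?_⟩
              · by_contra hd
                rw [Bool.not_eq_false] at hd
                have := (h2 v).mpr (Or.inl hd)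
                rw [(hΔold v hvΔ).2] at this
                cases this
              · have wcur := (h3 current hcurcomp).2.2.1
                rcases hcur01 with h0 | h0
                · rw [hval v hvΔ, h0]
                  have : pvWalk rows start current false := by simpa [h0] using wcur
                  simpa using this.snoc hadj
                · rw [hval v hvΔ, h0]
                  have : pvWalk rows start current true := by simpa [h0] using wcur
                  simpa using this.snoc hadj
              · rw [hval v hvΔ]
                rcases hcur01 with h0 | h0 <;> omega
          · intro v hd
            have hvcol : color.contains v = true := (h2 v).mpr (Or.inl hd)
            rw [hpres v hvcol]
            exact h4 v hd
          · rw [hcompI]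
            exact List.Nodup.append hnd hΔnd (fun a ha hΔ => hΔnotcomp a hΔ ha)
          · rw [hcompI]
            exact List.mem_append.mpr (Or.inl hstart)
        have hfuel' : qI.length + 28 < fuel + compI.length := by
          rw [hqI, hcompI]
          simp only [List.length_append]
          simp only [List.length_cons] at hfuel
          omega
        exact ih colorI qI compI hinv' hfuel'

-- ===================== Layer 9: the outer loop over CHORDS =====================

lemma pvColorWalk (rows : List Int) (color : PySem.Dict (Int × Int) Int)
    (h1 : ∀ v, color.contains v = true → v ∈ pvCHORDS ∧ (color.getD v 0 = 0 ∨ color.getD v 0 = 1))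
    (h2 : ∀ u v, color.contains u = true → pvAdj rows u v →
       color.contains v = true ∧ color.getD v 0 ≠ color.getD u 0) :
    ∀ {u v : Int × Int} {p : Bool}, pvWalk rows u v p → color.contains u = true →
      color.contains v = true ∧ ((color.getD u 0 = color.getD v 0) ↔ p = false) := by
  intro u v p hw
  induction hw with
  | nil x => intro h; exact ⟨h, by simp⟩
  | @cons x y z q a h ih =>
    intro hx
    have hy := h2 x y hx a
    obtain ⟨hz, hiff⟩ := ih hy.1
    refine ⟨hz, ?_⟩
    have hx01 := (h1 x hx).2
    have hy01 := (h1 y hy.1).2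
    have hz01 := (h1 z hz).2
    have hxy := hy.2
    cases q
    · have hyz : color.getD y 0 = color.getD z 0 := hiff.mpr rfl
      exact iff_of_false (by omega) (by simp)
    · have hyz : color.getD y 0 ≠ color.getD z 0 := fun h' => by simpa using hiff.mp h'
      exact iff_of_true (by omega) rfl

lemma pvWalkClosed (rows : List Int) (d : PySem.Dict (Int × Int) Int)
    (hcl : ∀ u v, d.contains u = true → pvAdj rows u v → d.contains v = true) :
    ∀ {u v : Int × Int} {p : Bool}, pvWalk rows u v p →
      d.contains u = true → d.contains v = true := by
  intro u v p hw
  induction hw with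
  | nil x => exact id
  | cons a h ih => exact fun hu => ih (hcl _ _ hu a)

lemma pvMain_spec (rows : List Int) (g : PySem.Dict (Int × Int) (PySem.Set (Int × Int)))
    (hg : ∀ u v, v ∈ g.getD u PySem.Set.empty ↔ pvAdj rows u v)
    (hgnd : ∀ u, (g.getD u PySem.Set.empty).Nodup) :
    ∀ (starts : List (Int × Int)) (color : PySem.Dict (Int × Int) Int),
      (∀ v, color.contains v = true → v ∈ pvCHORDS ∧ (color.getD v 0 = 0 ∨ color.getD v 0 = 1)) →
      (∀ u v, color.contains u = true → pvAdj rows u v →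
         color.contains v = true ∧ color.getD v 0 ≠ color.getD u 0) →
      (∀ u v, color.contains u = true → color.contains v = true → u ≠ v → pvWalk rows u v false →
         PySem.Int.band (pvMask u) (pvMask v) = 0) →
      (∀ v ∈ pvCHORDS, color.contains v = false → v ∈ starts) →
      starts ⊆ pvCHORDS →
      (pvMain g starts color = true ↔ pvOk rows) := by
  intro starts
  induction starts with
  | nil =>
    intro color m1 m2 m3 m6 _
    have hallcol : ∀ v ∈ pvCHORDS, color.contains v = true := by
      intro v hv
      by_contra h
      rw [Bool.not_eq_true] at h
      exact absurd (m6 v hv h) (List.not_mem_nil)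
    refine iff_of_true rfl ⟨?_, ?_⟩
    · intro v hv
      have hvC : v ∈ pvCHORDS := hv.left_mem (Or.inr rfl)
      have := pvColorWalk rows color m1 m2 hv (hallcol v hvC)
      exact absurd (this.2.mp rfl) (by decide)
    · intro u v hne hw
      exact m3 u v (hallcol u (hw.left_mem (Or.inl hne))) (hallcol v (hw.right_mem (Or.inl hne)))
        hne hw
  | cons start rest ih =>
    intro color m1 m2 m3 m6 hsub
    rw [pvMain]
    by_cases hc : color.contains start = true
    · rw [if_pos hc]
      refine ih color m1 m2 m3 ?_ (fun v hv => hsub (List.mem_cons_of_mem _ hv))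
      intro v hv hvc
      rcases List.mem_cons.mp (m6 v hv hvc) with rfl | h
      · rw [hc] at hvc; cases hvc
      · exact h
    · rw [if_neg hc]
      rw [Bool.not_eq_true] at hc
      have hstartC : start ∈ pvCHORDS := hsub (by simp)
      have hinv : pvInvV rows color (color.insert start 0) start [start] [start] := by
        refine ⟨⟨[], by simp, by simp⟩, ?_, ?_, ?_, by simp, by simp⟩
        · intro v
          rw [PySem.Dict.contains_insert]
          simp only [Bool.or_eq_true, beq_iff_eq, List.mem_singleton]
          tauto
        · intro v hvmem
          rcases List.mem_singleton.mp hvmem with rfl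
          refine ⟨hc, hstartC, ?_, ?_⟩
          · rw [PySem.Dict.getD_insert_self]
            exact (by simpa using pvWalk.nil v)
          · rw [PySem.Dict.getD_insert_self]
            exact Or.inl rfl
        · intro v hv
          have hvs : v ≠ start := fun he => by rw [he, hc] at hv; cases hv
          exact PySem.Dict.get?_insert_of_ne _ _ hvs
      have hbfs := pvBFS_spec rows g hg hgnd color
        (fun u v hu ha => (m2 u v hu ha).1) start 64 (color.insert start 0)
        [start] [start] hinv (by simp)
      match hres : pvBFS g 64 (color.insert start 0) [start] [start] with
      | none =>
        obtain ⟨w, hw⟩ := hbfs.1 hres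
        refine iff_of_false ?_ (fun hok => hok.1 w hw)
        simp [hres]
      | some (color2, comp) =>
        simp only [hres]
        have hpost := hbfs.2 color2 comp hres
        obtain ⟨hcol2, hpres2', hcompfacts, hcompnd, hstartcomp, hclosure2⟩ := hpost
        have hpres2 : ∀ v, color.contains v = true → color2.getD v 0 = color.getD v 0 := by
          intro v hv
          rw [PySem.Dict.getD_eq_get?_getD, hpres2' v hv, ← PySem.Dict.getD_eq_get?_getD]
        have m1' : ∀ v, color2.contains v = true →
            v ∈ pvCHORDS ∧ (color2.getD v 0 = 0 ∨ color2.getD v 0 = 1) := by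
          intro v hv
          rcases (hcol2 v).mp hv with hold | hnew
          · rw [hpres2 v hold]; exact m1 v hold
          · exact ⟨(hcompfacts v hnew).2.1, (hcompfacts v hnew).2.2.2⟩
        have m2' : ∀ u v, color2.contains u = true → pvAdj rows u v →
            color2.contains v = true ∧ color2.getD v 0 ≠ color2.getD u 0 := by
          intro u v hu ha
          rcases (hcol2 u).mp hu with hold | hnew
          · obtain ⟨hvc, hvv⟩ := m2 u v hold ha
            refine ⟨(hcol2 v).mpr (Or.inl hvc), ?_⟩
            rw [hpres2 v hvc, hpres2 u hold]
            exact hvv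
          · exact hclosure2 u hnew v ha
        have hwalk_to_same : ∀ u v, color2.contains u = true → pvWalk rows u v false →
            color2.getD u 0 = color2.getD v 0 :=
          fun u v hu hw => ((pvColorWalk rows color2 m1' m2' hw hu).2).mpr rfl
        have hsame_to_walk : ∀ u v, u ∈ comp → v ∈ comp →
            color2.getD u 0 = color2.getD v 0 → pvWalk rows u v false := by
          intro u v hu hv heq
          have wu := (hcompfacts u hu).2.2.1
          have wv := (hcompfacts v hv).2.2.1
          have := wu.symm.trans wv
          rw [heq] at this
          simpa using this
        by_cases hep : pvEpLoop color2 comp [0, 0] = true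
        · rw [if_pos hep]
          have hchar := (pvEpLoop_char color2 comp 0 0 (le_refl 0) (le_refl 0)
            (fun x hx => (hcompfacts x hx).2.2.2)).mp hep
          have hsym : Symmetric (fun x y => color2.getD x 0 = color2.getD y 0 →
              PySem.Int.band (pvMask x) (pvMask y) = 0) := by
            intro a b hR hcb
            rw [PySem.Int.band_comm]
            exact hR hcb.symm
          refine ih color2 m1' m2' ?_ ?_ (fun v hv => hsub (List.mem_cons_of_mem _ hv))
          · intro u v hu hv hne hw
            rcases (hcol2 u).mp hu with huo | hun <;> rcases (hcol2 v).mp hv with hvo | hvn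
            · rw [pvMask, pvMask]
              have := m3 u v huo hvo hne hw
              rwa [pvMask, pvMask] at this
            · exfalso
              have := pvWalkClosed rows color (fun a b ha hb => (m2 a b ha hb).1) hw huo
              rw [(hcompfacts v hvn).1] at this
              cases this
            · exfalso
              have := pvWalkClosed rows color (fun a b ha hb => (m2 a b ha hb).1) hw.symm hvo
              rw [(hcompfacts u hun).1] at this
              cases this
            · exact List.Pairwise.forall hsym hchar.2 hun hvn hne
                (hwalk_to_same u v ((hcol2 u).mpr (Or.inr hun)) hw)
          · intro v hv hvc
            have hvold : color.contains v = false := by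
              by_contra h'
              rw [Bool.not_eq_false] at h'
              rw [(hcol2 v).mpr (Or.inl h')] at hvc
              cases hvc
            rcases List.mem_cons.mp (m6 v hv hvold) with rfl | h
            · exfalso
              rw [(hcol2 v).mpr (Or.inr hstartcomp)] at hvc
              cases hvc
            · exact h
        · rw [if_neg hep]
          rw [Bool.not_eq_true] at hep
          have hAclause : ∀ x ∈ comp,
              PySem.Int.band (pvMask x) (if color2.getD x 0 = 0 then (0:Int) else 0) = 0 := by
            intro x _
            split <;> exact PySem.Int.band_zero (pvMask x)
          have hnotpw : ¬ comp.Pairwise (fun x y => color2.getD x 0 = color2.getD y 0 →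
              PySem.Int.band (pvMask x) (pvMask y) = 0) := by
            intro hpw
            have := (pvEpLoop_char color2 comp 0 0 (le_refl 0) (le_refl 0)
              (fun x hx => (hcompfacts x hx).2.2.2)).mpr ⟨hAclause, hpw⟩
            rw [hep] at this
            cases this
          rw [List.pairwise_iff_getElem] at hnotpw
          push_neg at hnotpw
          obtain ⟨i, j, hi, hj, hij, hR⟩ := hnotpw
          obtain ⟨heq, hband⟩ := hR
          have hmi : comp[i] ∈ comp := List.getElem_mem _
          have hmj : comp[j] ∈ comp := List.getElem_mem _
          have hne : comp[i] ≠ comp[j] := by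
            intro he
            exact absurd (hcompnd.getElem_inj_iff.mp he) (by omega)
          have hw := hsame_to_walk _ _ hmi hmj heq
          exact iff_of_false (by simp) (fun hok => hband (hok.2 _ _ hne hw))

-- ===================== Layer 10: assembly =====================

lemma pvA_true_iff (rows : List Int) :
    passes_forced_perpendicularity_filter rows = true ↔ pvOk rows := by
  unfold passes_forced_perpendicularity_filter
  refine pvMain_spec rows (pvBuildGraph rows) (fun u v => pvGraph_mem) (pvGraph_nodup rows)
    pvCHORDS PySem.Dict.empty ?_ ?_ ?_ ?_ (List.Subset.refl _)
  · intro v hv; rw [PySem.Dict.contains_empty] at hv; cases hv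
  · intro u v hu; rw [PySem.Dict.contains_empty] at hu; cases hu
  · intro u v hu; rw [PySem.Dict.contains_empty] at hu; cases hu
  · exact fun v hv _ => hv

-- ===== VERDICT (by name: the statement is the Claim_ definition above) =====
theorem passes_forced_perpendicularity_filter_spec : Claim_equal_passes_forced_perpendicularity_filter := by
  intro rows _ _
  unfold Spec_passes_forced_perpendicularity_filter
  exact Bool.coe_iff_coe.mp ((pvA_true_iff rows).trans (pvAlt_true_iff rows).symm)
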